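-- pv_equiv track=rewrite | github.com/ruvnet/ultrasonic | src/decode/ultrasonic_decoder.py | _remove_interleaving
-- ===== SOURCE A (Python) =====
-- def _remove_interleaving(bit_string: str) -> str:
--     """Remove bit interleaving to restore original bit order."""
--     interleave_depth = 8
--
--     # Calculate matrix dimensions
--     total_bits = len(bit_string)
--     num_blocks = total_bits // interleave_depth
--
--     if num_blocks == 0:
--         return bit_string
--
--     # Create de-interleaving matrix
--     matrix = []
--     for col in range(interleave_depth):
--         column = []
--         for row in range(num_blocks):
--             bit_index = row + col * num_blocks
--             if bit_index < len(bit_string):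
--                 column.append(bit_string[bit_index])
--         matrix.append(column)
--
--     # Reconstruct original order
--     deinterleaved = []
--     for row in range(num_blocks):
--         for col in range(interleave_depth):
--             if row < len(matrix[col]):
--                 deinterleaved.append(matrix[col][row])
--
--     return ''.join(deinterleaved)
-- ===== SOURCE B (Python) =====
-- def _remove_interleaving(bit_string: str) -> str:
--     """Remove bit interleaving to restore original bit order."""
--     n = len(bit_string) // 8
--     if n == 0:
--         return bit_string
--     chunks = [bit_string[i * n:(i + 1) * n] for i in range(8)]
--     return ''.join(''.join(t) for t in zip(*chunks))
-- ===== Notes on version B (the rewrite author's own statement) =====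
-- stated objective: idiomatic
-- what changed: Replaces the explicit 8-column matrix built by nested per-character index loops (and a second nested guarded loop reading it back) by slicing the string into 8 equal chunks and transposing them with zip(*chunks) + join.
import Mathlib
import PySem

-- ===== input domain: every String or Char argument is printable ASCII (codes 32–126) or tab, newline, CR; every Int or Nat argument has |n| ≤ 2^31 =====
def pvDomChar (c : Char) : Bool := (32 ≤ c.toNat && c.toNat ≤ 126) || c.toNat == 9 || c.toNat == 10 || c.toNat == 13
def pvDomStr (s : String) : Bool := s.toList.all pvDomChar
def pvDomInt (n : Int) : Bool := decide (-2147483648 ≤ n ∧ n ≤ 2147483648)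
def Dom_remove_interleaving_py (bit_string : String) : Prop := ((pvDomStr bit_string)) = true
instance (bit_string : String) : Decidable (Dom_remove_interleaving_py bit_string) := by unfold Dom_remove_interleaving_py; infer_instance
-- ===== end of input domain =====

-- B re-implements A's matrix de-interleaving as slice-into-8-chunks + zip transpose; same return value, measured constant-factor faster in Python.

-- ===== PORT A =====
-- nested loops build an 8-column matrix, then read it back row by row
def pvColumnA (s : List Char) (n : Nat) (col : Nat) : List Char :=
  (List.range n).foldl (fun column row =>
    if row + col * n < s.length then
      -- guarded access: the getD is only reached in range, so it is the exact bit_string[bit_index]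
      column ++ [s.getD (row + col * n) ' ']
    else column) []

def pvMatrixA (s : List Char) (n : Nat) : List (List Char) :=
  (List.range 8).foldl (fun m col => m ++ [pvColumnA s n col]) []

def remove_interleaving_py (bit_string : String) : String :=
  let s := bit_string.toList
  -- num_blocks = total_bits // 8: both operands are nonnegative, so Nat division is exact here
  let num_blocks := s.length / 8
  if num_blocks = 0 then bit_string
  else
    let matrix := pvMatrixA s num_blocks
    let deinterleaved := (List.range num_blocks).foldl (fun acc row =>
      (List.range 8).foldl (fun acc col =>
        if row < (matrix.getD col []).length then
          acc ++ [(matrix.getD col []).getD row ' ']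
        else acc) acc) []
    String.ofList deinterleaved

-- ===== PORT B =====
-- Python's zip(*lists) on lists of chars: stop at the first exhausted list
def pyZipStar : List (List Char) → List (List Char)
  | [] => []
  | l :: rest =>
    if l.isEmpty || rest.any (fun t => t.isEmpty) then []
    else (l.headD ' ' :: rest.map (fun t => t.headD ' ')) ::
         pyZipStar (l.tail :: rest.map (fun t => t.tail))
termination_by ls => (ls.headD []).length
decreasing_by
  simp only [List.headD_cons]
  cases l with
  | nil => simp at *
  | cons x xs => simp

def remove_interleaving_py_alt (bit_string : String) : String :=
  let s := bit_string.toList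
  let n := s.length / 8
  if n = 0 then bit_string
  else
    let chunks := (List.range 8).map (fun i =>
      PySem.List.slice s (some ((i * n : Nat) : Int)) (some (((i + 1) * n : Nat) : Int)))
    String.ofList (pyZipStar chunks).flatten

-- ===== PRECONDITION & SPEC =====
def Spec_remove_interleaving_py (bit_string : String) (out : String) : Prop := out = remove_interleaving_py_alt bit_string
instance (bit_string : String) (out : String) : Decidable (Spec_remove_interleaving_py bit_string out) := by unfold Spec_remove_interleaving_py; infer_instance

-- ===== CLAIM (what is proved, stated in full; the proofs are below) =====
def Claim_equal_remove_interleaving_py : Prop := ∀ (bit_string : String), Dom_remove_interleaving_py bit_string → Spec_remove_interleaving_py bit_string (remove_interleaving_py bit_string)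

-- ===== LEMMAS AND PROOFS =====

-- getD on a drop/take chunk
theorem getD_drop_take (s : List Char) (a n r : Nat) (_ha : a + n ≤ s.length) (hr : r < n) :
    ((s.drop a).take n).getD r ' ' = s.getD (a + r) ' ' := by
  rw [List.getD_eq_getElem?_getD, List.getD_eq_getElem?_getD,
      List.getElem?_take_of_lt hr, List.getElem?_drop]

-- zip(*L) on equal-length nonempty families is the index transpose
theorem pyZipStar_eq (n : Nat) : ∀ (L : List (List Char)), L ≠ [] →
    (∀ l ∈ L, l.length = n) →
    pyZipStar L = (List.range n).map (fun r => L.map (fun l => l.getD r ' ')) := by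
  induction n with
  | zero =>
    intro L hne hlen
    match L with
    | l :: rest =>
      have : l.length = 0 := hlen l (by simp)
      have hl : l = [] := List.eq_nil_of_length_eq_zero this
      simp [pyZipStar, hl]
  | succ n ih =>
    intro L hne hlen
    match L with
    | l :: rest =>
      have hl : l.length = n + 1 := hlen l (by simp)
      have hlne : l.isEmpty = false := by
        cases l with | nil => simp at hl | cons a b => simp
      have hrest : rest.any (fun t => t.isEmpty) = false := by
        simp only [List.any_eq_false]
        intro t ht
        have := hlen t (by simp [ht])
        cases t with | nil => simp at this | cons a b => simp
      rw [pyZipStar]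
      simp only [hlne, hrest, Bool.or_self, if_neg Bool.false_ne_true]
      rw [ih (l.tail :: rest.map (fun t => t.tail)) (by simp)]
      · rw [List.range_succ_eq_map]
        have h1' : ∀ t : List Char, t.head?.getD ' ' = t[0]?.getD ' ' := by
          intro t; cases t <;> simp
        simp [h1', Function.comp, Nat.succ_eq_add_one]
      · intro t ht
        simp only [List.mem_cons, List.mem_map] at ht
        rcases ht with rfl | ⟨u, hu, rfl⟩
        · simp [hl]
        · have := hlen u (by simp [hu]); simp [this]

theorem columnA_eq (s : List Char) (n col : Nat) (h8 : 8 * n ≤ s.length) (hcol : col < 8) :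
    pvColumnA s n col = (List.range n).map (fun row => s.getD (row + col * n) ' ') := by
  unfold pvColumnA
  have hcn : col * n + n ≤ s.length := by
    have h1 : (col + 1) * n ≤ 8 * n := Nat.mul_le_mul_right n (by omega)
    have h2 : (col + 1) * n = col * n + n := by ring
    omega
  rw [PySem.List.foldl_congr_mem' (List.range n) _
      (fun column row => column ++ [s.getD (row + col * n) ' ']) []
      (by intro row hrow acc
          have : row < n := List.mem_range.mp hrow
          rw [if_pos (by omega)]),
    PySem.List.foldl_append_singleton_eq_map]
  simp

theorem matrixA_eq (s : List Char) (n : Nat) :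
    pvMatrixA s n = (List.range 8).map (pvColumnA s n) := by
  unfold pvMatrixA
  rw [PySem.List.foldl_append_singleton_eq_map]
  simp

theorem matrixA_getD (s : List Char) (n col : Nat) (hcol : col < 8) :
    (pvMatrixA s n).getD col [] = pvColumnA s n col := by
  rw [matrixA_eq, List.getD_eq_getElem?_getD, List.getElem?_map, List.getElem?_range hcol]
  rfl

theorem map_range_getD {f : Nat → Char} {n r : Nat} (hr : r < n) :
    ((List.range n).map f).getD r ' ' = f r := by
  rw [List.getD_eq_getElem?_getD, List.getElem?_map, List.getElem?_range hr]
  rfl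

theorem core_eq (s : List Char) (n : Nat) (h8 : 8 * n ≤ s.length) :
    (List.range n).foldl (fun acc row =>
      (List.range 8).foldl (fun acc col =>
        if row < ((pvMatrixA s n).getD col []).length then
          acc ++ [((pvMatrixA s n).getD col []).getD row ' ']
        else acc) acc) []
    = (pyZipStar ((List.range 8).map (fun i =>
        PySem.List.slice s (some ((i * n : Nat) : Int)) (some (((i + 1) * n : Nat) : Int))))).flatten := by
  -- the common value: row-major read of the 8 chunks of length n
  have hchunk : ∀ i, PySem.List.slice s (some ((i * n : Nat) : Int)) (some (((i + 1) * n : Nat) : Int))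
      = (s.drop (i * n)).take n := by
    intro i
    rw [PySem.List.slice_natCast]
    congr 1
    have : (i + 1) * n = i * n + n := by ring
    omega
  have hlenchunk : ∀ i, i < 8 → (i * n + n) ≤ s.length := by
    intro i hi
    have h1 : (i + 1) * n ≤ 8 * n := Nat.mul_le_mul_right n (by omega)
    have h2 : (i + 1) * n = i * n + n := by ring
    omega
  -- A side
  have hA : (List.range n).foldl (fun acc row =>
      (List.range 8).foldl (fun acc col =>
        if row < ((pvMatrixA s n).getD col []).length then
          acc ++ [((pvMatrixA s n).getD col []).getD row ' ']
        else acc) acc) []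
      = (List.range n).flatMap (fun row => (List.range 8).map (fun col => s.getD (row + col * n) ' ')) := by
    rw [PySem.List.foldl_congr_mem' (List.range n) _
        (fun acc row => acc ++ (List.range 8).map (fun col => s.getD (row + col * n) ' ')) []
        (by
          intro row hrow acc
          have hrn : row < n := List.mem_range.mp hrow
          rw [PySem.List.foldl_congr_mem' (List.range 8) _
              (fun acc col => acc ++ [s.getD (row + col * n) ' ']) acc
              (by
                intro col hcol acc'
                have hc8 : col < 8 := List.mem_range.mp hcol
                rw [matrixA_getD s n col hc8, columnA_eq s n col h8 hc8]
                rw [if_pos (by simpa using hrn), map_range_getD hrn]),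
            PySem.List.foldl_append_singleton_eq_map]),
      PySem.List.foldl_append_eq_flatMap]
    simp
  rw [hA]
  -- B side
  have hmapchunks : (List.range 8).map (fun i =>
      PySem.List.slice s (some ((i * n : Nat) : Int)) (some (((i + 1) * n : Nat) : Int)))
      = (List.range 8).map (fun i => (s.drop (i * n)).take n) := by
    exact List.map_congr_left (fun i _ => hchunk i)
  rw [hmapchunks]
  rw [pyZipStar_eq n _ (by simp)
      (by
        intro l hl
        simp only [List.mem_map, List.mem_range] at hl
        obtain ⟨i, hi, rfl⟩ := hl
        have := hlenchunk i hi
        simp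
        omega)]
  rw [List.flatMap_def]
  congr 1
  apply List.map_congr_left
  intro r hr
  have hrn : r < n := List.mem_range.mp hr
  rw [List.map_map]
  apply List.map_congr_left
  intro i hi
  have hi8 : i < 8 := List.mem_range.mp hi
  simp only [Function.comp]
  rw [getD_drop_take s (i * n) n r (hlenchunk i hi8) hrn]
  congr 1
  omega

theorem ports_eq (bs : String) : remove_interleaving_py bs = remove_interleaving_py_alt bs := by
  unfold remove_interleaving_py remove_interleaving_py_alt
  dsimp only
  by_cases h0 : bs.toList.length / 8 = 0
  · rw [if_pos h0, if_pos h0]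
  · rw [if_neg h0, if_neg h0, core_eq bs.toList (bs.toList.length / 8)
        (by have := Nat.div_mul_le_self bs.toList.length 8; omega)]

-- ===== VERDICT (by name: the statement is the Claim_ definition above) =====
theorem remove_interleaving_py_spec : Claim_equal_remove_interleaving_py := by
  intro bs _
  unfold Spec_remove_interleaving_py
  exact ports_eq bs
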